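-- pv_equiv track=rewrite | github.com/Ookamiko/AdventOfCode | year_2017/day/day21.py | reassemble_display
-- ===== SOURCE A (Python) =====
-- import math
--
-- def reassemble_display(separations):
-- 	size = int(math.sqrt(len(separations)))
-- 	internal_size = int(math.sqrt(len(separations[0])))
-- 	result = ''
--
-- 	for i in range(size):
-- 		sub_tab = separations[size * i:size * (i + 1)]
-- 		for j in range(internal_size):
-- 			index = j * internal_size
-- 			for tab in sub_tab:
-- 				result += tab[index:index + internal_size]
--
-- 	return result
-- ===== SOURCE B (Python) =====
-- import math
--
--
-- def _add_tile(internal_size, size, buffers, idx, tile):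
--     bi = idx // size
--     for j in range(internal_size):
--         buffers[bi * internal_size + j] += tile[j * internal_size:(j + 1) * internal_size]
--
--
-- def reassemble_display(separations):
--     size = int(math.sqrt(len(separations)))
--     internal_size = int(math.sqrt(len(separations[0])))
--     buffers = [''] * (size * internal_size)
--     for idx, tile in enumerate(separations[:size * size]):
--         _add_tile(internal_size, size, buffers, idx, tile)
--     return ''.join(buffers)
-- ===== Notes on version B (the rewrite author's own statement) =====
-- stated objective: alternative
-- what changed: A gathers the output in output order with three nested loops slicing the tile list per block-row; B makes one pass over the tiles in tile order and scatters each tile's rows into per-row string buffers, joining the buffers at the end.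
import Mathlib
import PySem

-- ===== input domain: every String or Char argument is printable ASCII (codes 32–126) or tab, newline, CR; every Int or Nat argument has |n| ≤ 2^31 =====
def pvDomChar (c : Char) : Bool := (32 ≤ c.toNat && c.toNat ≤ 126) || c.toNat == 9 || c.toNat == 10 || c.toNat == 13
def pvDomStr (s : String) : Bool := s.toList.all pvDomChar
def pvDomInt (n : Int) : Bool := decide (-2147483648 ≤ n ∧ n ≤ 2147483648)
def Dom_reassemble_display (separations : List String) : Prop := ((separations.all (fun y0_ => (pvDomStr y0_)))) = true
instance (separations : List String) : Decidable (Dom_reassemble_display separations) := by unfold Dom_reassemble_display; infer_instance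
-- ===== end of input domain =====

-- B replaces A's three nested output-order gather loops by a single tile-order pass that scatters
-- each tile's rows into per-row buffers (alternative decomposition, same cost).

-- ===== PORT A =====
-- int(math.sqrt(n)) on a nonnegative length is ported as Nat.sqrt (exact on these lengths);
-- strings are handled as their code-point lists, string concatenation as list append.
def reassemble_display (separations : List String) : String :=
  let size := Nat.sqrt separations.length
  let internal_size := Nat.sqrt ((separations.headD "").toList.length)
  let result := (List.range size).foldl (fun result i =>
    let sub_tab := PySem.List.slice separations (some ((size * i : Nat) : Int)) (some ((size * (i + 1) : Nat) : Int))
    (List.range internal_size).foldl (fun result j =>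
      let index := j * internal_size
      sub_tab.foldl (fun result tab =>
        result ++ PySem.List.slice tab.toList (some ((index : Nat) : Int)) (some ((index + internal_size : Nat) : Int))) result) result) ([] : List Char)
  String.ofList result

-- ===== PORT B =====
-- tile[j*internal_size:(j+1)*internal_size]  (natural-number slice bounds)
def pvPiece (isz j : Nat) (t : List Char) : List Char := (t.drop (j * isz)).take isz

-- _add_tile: append each internal row of one tile to its buffer row
def pvAddTile (isz size : Nat) (bufs : List (List Char)) (idx : Nat) (t : List Char) : List (List Char) :=
  (List.range isz).foldl (fun bufs j =>
    bufs.set ((idx / size) * isz + j) (bufs.getD ((idx / size) * isz + j) [] ++ pvPiece isz j t)) bufs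

def reassemble_display_alt (separations : List String) : String :=
  let size := Nat.sqrt separations.length
  let internal_size := Nat.sqrt ((separations.headD "").toList.length)
  let bufs := (((separations.take (size * size)).map String.toList).zipIdx).foldl
    (fun bufs p => pvAddTile internal_size size bufs p.2 p.1)
    (List.replicate (size * internal_size) ([] : List Char))
  String.ofList bufs.flatten

-- ===== PRECONDITION & SPEC =====
-- Pre_ excludes only the empty list, on which the Python A raises IndexError at separations[0].
def Pre_reassemble_display (separations : List String) : Prop := separations ≠ []
instance (separations : List String) : Decidable (Pre_reassemble_display separations) := by unfold Pre_reassemble_display; infer_instance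
def pvWitness_reassemble_display : List String := ["a"]
def Spec_reassemble_display (separations : List String) (out : String) : Prop := out = reassemble_display_alt separations
instance (separations : List String) (out : String) : Decidable (Spec_reassemble_display separations out) := by unfold Spec_reassemble_display; infer_instance

-- ===== CLAIM (what is proved, stated in full; the proofs are below) =====
def Claim_equal_reassemble_display : Prop := ∀ (separations : List String), Dom_reassemble_display separations → Pre_reassemble_display separations → Spec_reassemble_display separations (reassemble_display separations)

-- ===== LEMMAS AND PROOFS =====

-- the common closed form: block-row i, internal row j, tiles size*i .. size*i+size-1
def pvGather (size isz : Nat) (seps : List (List Char)) : List Char :=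
  ((List.range size).map (fun i =>
    ((List.range isz).map (fun j =>
      (((seps.drop (size * i)).take size).map (pvPiece isz j)).flatten)).flatten)).flatten

theorem pv_foldl_app {α : Type} (f : α → List Char) :
    ∀ (l : List α) (r : List Char), l.foldl (fun r x => r ++ f x) r = r ++ (l.map f).flatten := by
  intro l
  induction l with
  | nil => simp
  | cons x xs ih => intro r; simp [ih, List.append_assoc]

theorem pv_foldl_eq_of {α : Type} (l : List α) (F : List Char → α → List Char) (g : α → List Char)
    (h : ∀ r x, F r x = r ++ g x) (r : List Char) :
    l.foldl F r = r ++ (l.map g).flatten := by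
  have : F = fun r x => r ++ g x := funext fun r => funext fun x => h r x
  rw [this, pv_foldl_app]

theorem pv_A_closed (seps : List String) :
    reassemble_display seps =
      String.ofList (pvGather (Nat.sqrt seps.length) (Nat.sqrt ((seps.headD "").toList.length)) (seps.map String.toList)) := by
  simp only [reassemble_display, pvGather]
  generalize Nat.sqrt seps.length = size
  generalize Nat.sqrt ((seps.headD "").toList.length) = isz
  congr 1
  have hinner : ∀ (r : List Char) (i j : Nat),
      (PySem.List.slice seps (some ((size * i : Nat) : Int)) (some ((size * (i + 1) : Nat) : Int))).foldl
        (fun r tab => r ++ PySem.List.slice tab.toList (some ((j * isz : Nat) : Int)) (some ((j * isz + isz : Nat) : Int))) r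
      = r ++ ((((seps.map String.toList).drop (size * i)).take size).map (pvPiece isz j)).flatten := by
    intro r i j
    rw [pv_foldl_eq_of _ _ (fun tab => pvPiece isz j tab.toList)
      (by
        intro r tab
        congr 1
        rw [PySem.List.slice_natCast]
        simp [pvPiece]) r]
    congr 1
    rw [PySem.List.slice_natCast]
    have h1 : size * (i + 1) - size * i = size := by
      rw [Nat.mul_succ]; omega
    rw [h1, ← List.map_drop, ← List.map_take, List.map_map]
    rfl
  have hmid : ∀ (r : List Char) (i : Nat),
      (List.range isz).foldl (fun r j =>
        (PySem.List.slice seps (some ((size * i : Nat) : Int)) (some ((size * (i + 1) : Nat) : Int))).foldl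
          (fun r tab => r ++ PySem.List.slice tab.toList (some ((j * isz : Nat) : Int)) (some ((j * isz + isz : Nat) : Int))) r) r
      = r ++ ((List.range isz).map (fun j =>
          ((((seps.map String.toList).drop (size * i)).take size).map (pvPiece isz j)).flatten)).flatten := by
    intro r i
    exact pv_foldl_eq_of _ _ _ (fun r j => hinner r i j) r
  rw [pv_foldl_eq_of _ _ (fun i => ((List.range isz).map (fun j =>
        ((((seps.map String.toList).drop (size * i)).take size).map (pvPiece isz j)).flatten)).flatten)
      (fun r i => hmid r i) []]
  simp

theorem pv_setRange_length (base isz : Nat) (t : List Char) :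
    ∀ (js : List Nat) (bufs : List (List Char)),
      (js.foldl (fun bufs j => bufs.set (base + j) (bufs.getD (base + j) [] ++ pvPiece isz j t)) bufs).length = bufs.length := by
  intro js
  induction js with
  | nil => intro bufs; rfl
  | cons x xs ih => intro bufs; rw [List.foldl_cons, ih, List.length_set]

theorem pv_getD_set (l : List (List Char)) (k r : Nat) (v : List Char) (hk : k < l.length) :
    (l.set k v).getD r [] = if k = r then v else l.getD r [] := by
  by_cases h : k = r
  · subst h; simp [List.getD_eq_getElem?_getD, List.getElem?_set, hk]
  · simp [List.getD_eq_getElem?_getD, List.getElem?_set, h]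

theorem pv_setRange_getD (isz : Nat) (t : List Char) (base : Nat) :
    ∀ (n : Nat) (bufs : List (List Char)) (r : Nat), base + n ≤ bufs.length →
      ((List.range n).foldl (fun bufs j => bufs.set (base + j) (bufs.getD (base + j) [] ++ pvPiece isz j t)) bufs).getD r []
      = if base ≤ r ∧ r < base + n then bufs.getD r [] ++ pvPiece isz (r - base) t else bufs.getD r [] := by
  intro n
  induction n with
  | zero =>
    intro bufs r _
    simp only [List.range_zero, List.foldl_nil]
    rw [if_neg (by omega)]
  | succ n ih =>
    intro bufs r hle
    rw [List.range_succ, List.foldl_append, List.foldl_cons, List.foldl_nil]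
    have hM : (((List.range n).foldl (fun bufs j => bufs.set (base + j) (bufs.getD (base + j) [] ++ pvPiece isz j t)) bufs)).length = bufs.length :=
      pv_setRange_length base isz t _ bufs
    set M := ((List.range n).foldl (fun bufs j => bufs.set (base + j) (bufs.getD (base + j) [] ++ pvPiece isz j t)) bufs) with hMdef
    have hgd : ∀ r', M.getD r' [] = if base ≤ r' ∧ r' < base + n then bufs.getD r' [] ++ pvPiece isz (r' - base) t else bufs.getD r' [] := by
      intro r'; exact ih bufs r' (by omega)
    have hMn : M.getD (base + n) [] = bufs.getD (base + n) [] := by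
      rw [hgd, if_neg (by omega)]
    rw [pv_getD_set M (base + n) r _ (by omega)]
    by_cases hr : base + n = r
    · subst hr
      rw [if_pos rfl, hMn, if_pos (by omega)]
      have h1 : base + n - base = n := by omega
      rw [h1]
    · rw [if_neg hr, hgd]
      by_cases h1 : base ≤ r ∧ r < base + n
      · rw [if_pos h1, if_pos (by omega)]
      · rw [if_neg h1, if_neg (by omega)]

theorem pv_addTile_length (isz size : Nat) (bufs : List (List Char)) (idx : Nat) (t : List Char) :
    (pvAddTile isz size bufs idx t).length = bufs.length :=
  pv_setRange_length ((idx / size) * isz) isz t _ bufs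

theorem pv_addTile_getD (isz size : Nat) (bufs : List (List Char)) (idx : Nat) (t : List Char) (r : Nat)
    (h : (idx / size) * isz + isz ≤ bufs.length) :
    (pvAddTile isz size bufs idx t).getD r []
    = if (idx / size) * isz ≤ r ∧ r < (idx / size) * isz + isz then
        bufs.getD r [] ++ pvPiece isz (r - (idx / size) * isz) t else bufs.getD r [] :=
  pv_setRange_getD isz t ((idx / size) * isz) isz bufs r h

theorem pv_scatter_length (isz size : Nat) :
    ∀ (ps : List (List Char × Nat)) (bufs : List (List Char)),
      (ps.foldl (fun bufs p => pvAddTile isz size bufs p.2 p.1) bufs).length = bufs.length := by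
  intro ps
  induction ps with
  | nil => intro bufs; rfl
  | cons p ps ih => intro bufs; rw [List.foldl_cons, ih, pv_addTile_length]

theorem pv_chunk_getD (isz size : Nat) (i : Nat) (hi : i < size) :
    ∀ (ts : List (List Char)), ts.length ≤ size → ∀ (bufs : List (List Char)), bufs.length = size * isz → ∀ (r : Nat),
      ((ts.zipIdx (size * i)).foldl (fun bufs p => pvAddTile isz size bufs p.2 p.1) bufs).getD r []
      = if i * isz ≤ r ∧ r < i * isz + isz then
          bufs.getD r [] ++ (ts.map (fun t => pvPiece isz (r - i * isz) t)).flatten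
        else bufs.getD r [] := by
  intro ts
  induction ts using List.reverseRecOn with
  | nil =>
    intro _ bufs _ r
    simp only [List.zipIdx_nil, List.foldl_nil, List.map_nil, List.flatten_nil, List.append_nil]
    split_ifs <;> rfl
  | append_singleton ts t ih =>
    intro hts bufs hlen r
    have htslt : ts.length < size := by
      have := List.length_append (as := ts) (bs := [t]); simp at hts; omega
    have hts' : ts.length ≤ size := by omega
    rw [List.zipIdx_append, List.foldl_append]
    simp only [List.zipIdx_cons, List.zipIdx_nil, List.foldl_cons, List.foldl_nil]
    have hMlen : ((ts.zipIdx (size * i)).foldl (fun bufs p => pvAddTile isz size bufs p.2 p.1) bufs).length = size * isz := by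
      rw [pv_scatter_length]; exact hlen
    set M := (ts.zipIdx (size * i)).foldl (fun bufs p => pvAddTile isz size bufs p.2 p.1) bufs with hMdef
    have hdiv : (size * i + ts.length) / size = i := by
      rw [Nat.mul_add_div (by omega), Nat.div_eq_of_lt htslt]
      omega
    have hsucc : (i + 1) * isz = i * isz + isz := by
      have := Nat.succ_mul i isz; omega
    have hub : (i + 1) * isz ≤ size * isz := Nat.mul_le_mul_right isz (by omega)
    rw [pv_addTile_getD isz size M (size * i + ts.length) t r (by rw [hdiv, hMlen]; omega)]
    rw [hdiv]
    have hgd : ∀ r', M.getD r' [] = if i * isz ≤ r' ∧ r' < i * isz + isz then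
          bufs.getD r' [] ++ (ts.map (fun t => pvPiece isz (r' - i * isz) t)).flatten
        else bufs.getD r' [] := fun r' => ih hts' bufs hlen r'
    rw [hgd]
    by_cases h1 : i * isz ≤ r ∧ r < i * isz + isz
    · rw [if_pos h1, if_pos h1, if_pos h1]
      simp [List.append_assoc]
    · rw [if_neg h1, if_neg h1, if_neg h1]

theorem pv_blocks_getD (isz size : Nat) (hisz : 0 < isz) (seps : List (List Char)) (hlen2 : size * size ≤ seps.length) :
    ∀ (b i0 : Nat), i0 + b = size → ∀ (bufs : List (List Char)), bufs.length = size * isz → ∀ (r : Nat),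
      ((((seps.drop (size * i0)).take (size * b)).zipIdx (size * i0)).foldl (fun bufs p => pvAddTile isz size bufs p.2 p.1) bufs).getD r []
      = if i0 * isz ≤ r ∧ r < size * isz then
          bufs.getD r [] ++ (((seps.drop (size * (r / isz))).take size).map (fun t => pvPiece isz (r % isz) t)).flatten
        else bufs.getD r [] := by
  intro b
  induction b with
  | zero =>
    intro i0 h bufs hlen r
    simp only [Nat.mul_zero, List.take_zero, List.zipIdx_nil, List.foldl_nil]
    have hs : i0 = size := by omega
    rw [hs, if_neg (by omega)]
  | succ b ih =>
    intro i0 h bufs hlen r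
    have hi0 : i0 < size := by omega
    have hm1 : size * (i0 + 1) = size * i0 + size := Nat.mul_succ size i0
    have hm2 : size * (b + 1) = size * b + size := Nat.mul_succ size b
    have hm3 : size * (i0 + 1) ≤ size * size := Nat.mul_le_mul_left size (by omega)
    have hchunklen : ((seps.drop (size * i0)).take size).length = size := by
      rw [List.length_take, List.length_drop]
      omega
    have hsplit : (seps.drop (size * i0)).take (size * (b + 1))
        = (seps.drop (size * i0)).take size ++ (seps.drop (size * (i0 + 1))).take (size * b) := by
      have h1 : size * (b + 1) = size + size * b := by omega
      rw [h1, List.take_add, List.drop_drop]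
      have h2 : size * i0 + size = size * (i0 + 1) := by omega
      rw [h2]
    rw [hsplit, List.zipIdx_append, List.foldl_append, hchunklen]
    have hoff : size * i0 + size = size * (i0 + 1) := by omega
    rw [hoff]
    set M := (((seps.drop (size * i0)).take size).zipIdx (size * i0)).foldl (fun bufs p => pvAddTile isz size bufs p.2 p.1) bufs with hMdef
    have hMlen : M.length = size * isz := by rw [hMdef, pv_scatter_length]; exact hlen
    rw [ih (i0 + 1) (by omega) M hMlen r]
    have hgd : ∀ r', M.getD r' [] = if i0 * isz ≤ r' ∧ r' < i0 * isz + isz then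
          bufs.getD r' [] ++ (((seps.drop (size * i0)).take size).map (fun t => pvPiece isz (r' - i0 * isz) t)).flatten
        else bufs.getD r' [] := by
      intro r'
      exact pv_chunk_getD isz size i0 hi0 ((seps.drop (size * i0)).take size) (by omega) bufs hlen r'
    have hmono : (i0 + 1) * isz = i0 * isz + isz := by
      have := Nat.succ_mul i0 isz; omega
    have hub : (i0 + 1) * isz ≤ size * isz := Nat.mul_le_mul_right isz (by omega)
    by_cases hA : (i0 + 1) * isz ≤ r ∧ r < size * isz
    · rw [if_pos hA, hgd, if_neg (by omega), if_pos (by omega)]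
    · rw [if_neg hA, hgd]
      by_cases hB : i0 * isz ≤ r ∧ r < i0 * isz + isz
      · rw [if_pos hB, if_pos (by omega)]
        have h1 : r = isz * i0 + (r - i0 * isz) := by
          have := Nat.mul_comm isz i0; omega
        have hdiv : r / isz = i0 := by
          rw [h1, Nat.mul_add_div hisz, Nat.div_eq_of_lt (by omega)]
          omega
        have hmod : r % isz = r - i0 * isz := by
          conv_lhs => rw [h1]
          rw [Nat.mul_add_mod, Nat.mod_eq_of_lt (by omega)]
        rw [hdiv, hmod]
      · rw [if_neg hB, if_neg (by omega)]

theorem pv_range_mul_flatten (n : Nat) (f : Nat → List Char) :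
    ∀ (m : Nat), ((List.range (m * n)).map f).flatten
      = ((List.range m).map (fun i => ((List.range n).map (fun j => f (i * n + j))).flatten)).flatten := by
  intro m
  induction m with
  | zero => simp
  | succ m ih =>
    have h1 : (m + 1) * n = m * n + n := by
      have := Nat.succ_mul m n; omega
    rw [h1, List.range_add, List.map_append, List.flatten_append, ih, List.range_succ]
    rw [List.map_append, List.flatten_append]
    simp only [List.map_cons, List.map_nil, List.flatten_cons, List.flatten_nil, List.append_nil, List.map_map]
    rfl

theorem pv_isz_zero_B (seps : List String) (h : Nat.sqrt ((seps.headD "").toList.length) = 0) :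
    reassemble_display_alt seps = String.ofList [] := by
  simp only [reassemble_display_alt, h]
  congr 1
  simp only [Nat.mul_zero, List.replicate_zero]
  have hAdd : ∀ (bufs : List (List Char)) (idx : Nat) (t : List Char), pvAddTile 0 (Nat.sqrt seps.length) bufs idx t = bufs := by
    intro bufs idx t; rfl
  have hfold : ∀ (ps : List (List Char × Nat)), (ps.foldl (fun bufs p => pvAddTile 0 (Nat.sqrt seps.length) bufs p.2 p.1) ([] : List (List Char))) = [] := by
    intro ps
    induction ps with
    | nil => rfl
    | cons p ps ih => rw [List.foldl_cons, hAdd]; exact ih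
  rw [hfold]
  rfl

theorem pv_isz_zero_gather (size : Nat) (seps : List (List Char)) : pvGather size 0 seps = [] := by
  simp [pvGather]

theorem pv_B_closed (seps : List String) :
    reassemble_display_alt seps =
      String.ofList (pvGather (Nat.sqrt seps.length) (Nat.sqrt ((seps.headD "").toList.length)) (seps.map String.toList)) := by
  by_cases hisz0 : Nat.sqrt ((seps.headD "").toList.length) = 0
  · rw [pv_isz_zero_B seps hisz0, hisz0, pv_isz_zero_gather]
  · simp only [reassemble_display_alt]
    generalize hsz : Nat.sqrt seps.length = size
    generalize hiz : Nat.sqrt ((seps.headD "").toList.length) = isz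
    rw [hiz] at hisz0
    have hisz : 0 < isz := by omega
    have hsq : size * size ≤ seps.length := by
      rw [← hsz]
      have h := Nat.sqrt_le' seps.length
      rwa [sq] at h
    rw [List.map_take]
    set seps' := seps.map String.toList with hseps'
    have hlen' : seps'.length = seps.length := by simp [hseps']
    have hfinal : ∀ (r : Nat), r < size * isz →
        (((seps'.take (size * size)).zipIdx).foldl
            (fun bufs p => pvAddTile isz size bufs p.2 p.1)
            (List.replicate (size * isz) ([] : List Char))).getD r []
        = (((seps'.drop (size * (r / isz))).take size).map (fun t => pvPiece isz (r % isz) t)).flatten := by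
      intro r hr
      have h := pv_blocks_getD isz size hisz seps' (by omega) size 0 (by omega)
        (List.replicate (size * isz) ([] : List Char)) (by simp) r
      simp only [Nat.mul_zero, List.drop_zero] at h
      rw [h, if_pos (by omega), List.getD_replicate _ hr]
      simp
    set F := (((seps'.take (size * size)).zipIdx).foldl
        (fun bufs p => pvAddTile isz size bufs p.2 p.1)
        (List.replicate (size * isz) ([] : List Char))) with hF
    have hFlen : F.length = size * isz := by
      rw [hF, pv_scatter_length]; simp
    have hFeq : F = (List.range (size * isz)).map
        (fun r => (((seps'.drop (size * (r / isz))).take size).map (fun t => pvPiece isz (r % isz) t)).flatten) := by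
      apply List.ext_getElem
      · simp [hFlen]
      · intro n h1 h2
        have hn : n < size * isz := by rwa [hFlen] at h1
        have hh := hfinal n hn
        rw [List.getD_eq_getElem?_getD, List.getElem?_eq_getElem h1] at hh
        simp only [Option.getD_some] at hh
        rw [hh]
        simp
    rw [hFeq]
    congr 1
    rw [pv_range_mul_flatten isz _ size]
    simp only [pvGather]
    congr 1
    apply List.map_congr_left
    intro i hi
    rw [List.mem_range] at hi
    congr 1
    apply List.map_congr_left
    intro j hj
    rw [List.mem_range] at hj
    have h1 : i * isz + j = isz * i + j := by
      rw [Nat.mul_comm]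
    have hdiv : (i * isz + j) / isz = i := by
      rw [h1, Nat.mul_add_div hisz, Nat.div_eq_of_lt hj]
      omega
    have hmod : (i * isz + j) % isz = j := by
      rw [h1, Nat.mul_add_mod, Nat.mod_eq_of_lt hj]
    rw [hdiv, hmod]

-- ===== VERDICT (by name: the statement is the Claim_ definition above) =====
theorem reassemble_display_spec : Claim_equal_reassemble_display := by
  intro seps _ _
  unfold Spec_reassemble_display
  rw [pv_A_closed, pv_B_closed]
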